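-- pv_equiv track=rewrite | github.com/josephsenior/Grinta-Agent | forge/metasop/replay.py | _diff_sequence
-- ===== SOURCE A (Python) =====
-- from collections import Counter
-- from collections.abc import Sequence
-- from typing import Any, cast
--
-- def _diff_sequence(label: str, observed: Sequence[str | None]) -> list[str]:
--     diffs: list[str] = []
--     if not observed:
--         diffs.append(f"{label}: empty sequence")
--         return diffs
--
--     non_str = [item for item in observed if not isinstance(item, str)]
--     if non_str:
--         diffs.append(
--             f"{label}: non-string entries detected: {sorted({str(item) for item in non_str})}",
--         )
--
--     string_entries = [cast(str, item) for item in observed if isinstance(item, str)]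
--     counts = Counter(string_entries)
--     duplicates = sorted({entry for entry, count in counts.items() if count > 1})
--     if duplicates:
--         diffs.append(f"{label}: duplicate entries detected: {duplicates}")
--     return diffs
-- ===== SOURCE B (Python) =====
-- def _diff_sequence(label, observed):
--     if not observed:
--         return [f"{label}: empty sequence"]
--     diffs = []
--     non_str = sorted({str(item) for item in observed if not isinstance(item, str)})
--     if non_str:
--         diffs.append(f"{label}: non-string entries detected: {non_str}")
--     strings = sorted(item for item in observed if isinstance(item, str))
--     n = len(strings)
--     duplicates = []
--     for i in range(1, n):
--         if strings[i - 1] == strings[i] and (i + 1 == n or strings[i + 1] != strings[i]):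
--             duplicates.append(strings[i])
--     if duplicates:
--         diffs.append(f"{label}: duplicate entries detected: {duplicates}")
--     return diffs
-- ===== Notes on version B (the rewrite author's own statement) =====
-- stated objective: alternative
-- what changed: Replaces A's Counter/multiset counting of duplicates by a sort-then-adjacent-scan: B sorts the string entries once and collects each value at the last position of an equal adjacent run, which yields the sorted duplicate list directly with no Counter and no set of duplicates.
import Mathlib
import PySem

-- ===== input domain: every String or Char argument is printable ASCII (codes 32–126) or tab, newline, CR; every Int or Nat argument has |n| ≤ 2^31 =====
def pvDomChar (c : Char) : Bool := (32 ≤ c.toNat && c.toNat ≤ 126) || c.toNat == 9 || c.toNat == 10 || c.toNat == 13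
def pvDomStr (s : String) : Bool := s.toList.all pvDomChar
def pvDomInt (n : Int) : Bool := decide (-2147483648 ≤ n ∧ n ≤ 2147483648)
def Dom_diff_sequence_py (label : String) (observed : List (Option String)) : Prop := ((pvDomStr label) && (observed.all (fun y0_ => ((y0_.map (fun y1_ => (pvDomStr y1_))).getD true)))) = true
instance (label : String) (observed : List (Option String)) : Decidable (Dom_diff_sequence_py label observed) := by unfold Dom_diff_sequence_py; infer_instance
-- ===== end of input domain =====

-- B detects duplicates by sorting the string entries once and collecting each value at the end of an equal adjacent run, instead of A's Counter + filtered set + sort; same return value, no speed claim.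

-- shared f-string helpers: Python's repr of a str (exact on Dom's character set: printable ASCII, tab, newline, CR) and of a list of str
def pyEscChar (q c : Char) : List Char :=
  if c = '\\' then ['\\', '\\']
  else if c = q then ['\\', q]
  else if c = '\t' then ['\\', 't']
  else if c = '\n' then ['\\', 'n']
  else if c = '\r' then ['\\', 'r']
  else [c]

def pyReprStr (s : String) : String :=
  let cs := s.toList
  let q := if cs.contains '\'' && !cs.contains '"' then '"' else '\''
  String.ofList ([q] ++ cs.flatMap (pyEscChar q) ++ [q])

def pyReprStrList (xs : List String) : String :=
  "[" ++ PySem.Str.join ", " (xs.map pyReprStr) ++ "]"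

-- str(item) for an item of type str | None (only None reaches it in A and B)
def pyStrOfOpt (o : Option String) : String :=
  match o with
  | none => "None"
  | some s => s

-- ===== PORT A =====
def diff_sequence_py (label : String) (observed : List (Option String)) : List String :=
  if observed.isEmpty then [label ++ ": empty sequence"]
  else
    let nonStr := observed.filter (fun item => !item.isSome)
    let d1 : List String :=
      if !nonStr.isEmpty then
        [label ++ ": non-string entries detected: " ++
          pyReprStrList (PySem.List.sorted (PySem.Set.ofList (nonStr.map pyStrOfOpt)) (fun s => s))]
      else []
    let stringEntries := observed.filterMap (fun x => x)
    let counts := PySem.Dict.counter stringEntries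
    let duplicates := PySem.List.sorted
        (PySem.Set.ofList ((counts.items.filter (fun p => 1 < p.2)).map (fun p => p.1))) (fun s => s)
    let d2 : List String :=
      if !duplicates.isEmpty then
        [label ++ ": duplicate entries detected: " ++ pyReprStrList duplicates]
      else []
    d1 ++ d2

-- ===== PORT B =====
-- Source B's index loop 'for i in range(1, n)' over the sorted list, as the equivalent
-- structural recursion over the window (strings[i-1], strings[i], strings[i+1:]):
-- emit strings[i] when strings[i-1] == strings[i] and (i+1 == n or strings[i+1] != strings[i]).
def dupAdj : List String → List String
  | a :: b :: rest =>
      (if a = b ∧ rest.head? ≠ some b then [b] else []) ++ dupAdj (b :: rest)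
  | _ => []
  termination_by l => l.length

def diff_sequence_py_alt (label : String) (observed : List (Option String)) : List String :=
  if observed.isEmpty then [label ++ ": empty sequence"]
  else
    let nonStr := PySem.List.sorted
      (PySem.Set.ofList ((observed.filter (fun item => !item.isSome)).map pyStrOfOpt)) (fun s => s)
    let d1 : List String :=
      if !nonStr.isEmpty then
        [label ++ ": non-string entries detected: " ++ pyReprStrList nonStr]
      else []
    let strings := PySem.List.sorted (observed.filterMap (fun x => x)) (fun s => s)
    let duplicates := dupAdj strings
    let d2 : List String :=
      if !duplicates.isEmpty then
        [label ++ ": duplicate entries detected: " ++ pyReprStrList duplicates]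
      else []
    d1 ++ d2

-- ===== PRECONDITION & SPEC =====
def Spec_diff_sequence_py (label : String) (observed : List (Option String)) (out : List String) : Prop := out = diff_sequence_py_alt label observed
instance (label : String) (observed : List (Option String)) (out : List String) : Decidable (Spec_diff_sequence_py label observed out) := by unfold Spec_diff_sequence_py; infer_instance

-- ===== CLAIM (what is proved, stated in full; the proofs are below) =====
def Claim_equal_diff_sequence_py : Prop := ∀ (label : String) (observed : List (Option String)), Dom_diff_sequence_py label observed → Spec_diff_sequence_py label observed (diff_sequence_py label observed)

-- ===== LEMMAS AND PROOFS =====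

-- on a sorted list, dupAdj yields a strictly increasing list whose members are exactly the values occurring at least twice
lemma dupAdj_spec (t : List String) (h : t.Pairwise (· ≤ ·)) :
    (dupAdj t).Pairwise (· < ·) ∧ ∀ x, x ∈ dupAdj t ↔ 2 ≤ t.count x := by
  induction t with
  | nil => exact ⟨by simp [dupAdj], fun x => by simp [dupAdj]⟩
  | cons a t ih =>
    cases t with
    | nil =>
      refine ⟨by simp [dupAdj], fun x => ?_⟩
      simp only [dupAdj, List.not_mem_nil, false_iff, not_le, List.count_cons, List.count_nil]
      split <;> omega
    | cons b rest =>
      rw [List.pairwise_cons] at h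
      obtain ⟨hatail, htail⟩ := h
      have hab : a ≤ b := hatail b (by simp)
      obtain ⟨ihp, ihm⟩ := ih htail
      by_cases heq : a = b
      · subst heq
        by_cases hhd : rest.head? = some a
        · -- run continues: skip this position, a already counted ≥ 2 in the tail
          have hstep : dupAdj (a :: a :: rest) = dupAdj (a :: rest) := by
            simp [dupAdj, hhd]
          have hcr : 1 ≤ rest.count a := by
            cases rest with
            | nil => simp at hhd
            | cons c r =>
              have hca : c = a := by simpa using hhd
              subst hca
              simp [List.count_cons_self]
          refine ⟨hstep ▸ ihp, fun x => ?_⟩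
          rw [hstep, ihm]
          by_cases hx : x = a
          · subst hx
            rw [List.count_cons_self, List.count_cons_self, List.count_cons_self]
            omega
          · rw [List.count_cons_of_ne (Ne.symm hx), List.count_cons_of_ne (Ne.symm hx), List.count_cons_of_ne (Ne.symm hx)]
        · -- end of a run of a's: emit a
          have hstep : dupAdj (a :: a :: rest) = a :: dupAdj (a :: rest) := by
            simp [dupAdj, hhd]
          have hanotrest : a ∉ rest := by
            cases rest with
            | nil => simp
            | cons c r =>
              have hac : a ≤ c := (List.pairwise_cons.mp htail).1 c (by simp)
              have hne : a ≠ c := fun he => hhd (by simp [← he])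
              have halt : a < c := lt_of_le_of_ne hac hne
              intro hmem
              rcases List.mem_cons.mp hmem with rfl | hr
              · exact lt_irrefl _ halt
              · have hca : c ≤ a := (List.pairwise_cons.mp (List.pairwise_cons.mp htail).2).1 a hr
                exact absurd (lt_of_lt_of_le halt hca) (lt_irrefl _)
          have hcount0 : rest.count a = 0 := List.count_eq_zero.mpr hanotrest
          have hanot : a ∉ dupAdj (a :: rest) := by
            rw [ihm, List.count_cons_self, hcount0]; omega
          constructor
          · rw [hstep]
            refine List.pairwise_cons.mpr ⟨fun y hy => ?_, ihp⟩
            have hc := (ihm y).mp hy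
            have hyrest : y ∈ rest := by
              have hymem : y ∈ a :: rest := List.count_pos_iff.mp (by omega)
              rcases List.mem_cons.mp hymem with rfl | hr
              · rw [List.count_cons_self, hcount0] at hc; omega
              · exact hr
            have hay : a ≤ y := (List.pairwise_cons.mp htail).1 y hyrest
            exact lt_of_le_of_ne hay (fun he => hanotrest (he ▸ hyrest))
          · intro x
            rw [hstep]
            by_cases hx : x = a
            · subst hx
              rw [List.count_cons_self, List.count_cons_self, hcount0]
              simp
            · rw [List.count_cons_of_ne (Ne.symm hx)]
              simp only [List.mem_cons, hx, false_or]
              exact ihm x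
      · -- a < b: a never reappears; the pair condition a = b fails
        have hstep : dupAdj (a :: b :: rest) = dupAdj (b :: rest) := by
          simp [dupAdj, heq]
        have halt : a < b := lt_of_le_of_ne hab heq
        have hanot : a ∉ b :: rest := by
          intro hmem
          have hba : b ≤ a := by
            rcases List.mem_cons.mp hmem with rfl | hr
            · exact le_refl _
            · exact (List.pairwise_cons.mp htail).1 a hr
          exact absurd (lt_of_lt_of_le halt hba) (lt_irrefl _)
        have hcount0 : (b :: rest).count a = 0 := List.count_eq_zero.mpr hanot
        refine ⟨hstep ▸ ihp, fun x => ?_⟩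
        rw [hstep, ihm]
        by_cases hx : x = a
        · subst hx
          rw [List.count_cons_self, hcount0]
          omega
        · rw [List.count_cons_of_ne (Ne.symm hx)]

-- A's duplicate set, characterised
lemma dupsA_eq (entries : List String) :
    PySem.Set.ofList ((((PySem.Dict.counter entries).items).filter (fun p => 1 < p.2)).map (fun p => p.1)) =
      (PySem.Set.ofList entries).filter (fun k => decide (2 ≤ entries.count k)) := by
  rw [PySem.Dict.items_counter]
  have h1 : ((PySem.Set.ofList entries).map (fun k => (k, (entries.count k : Int)))).filter (fun p => 1 < p.2)
      = ((PySem.Set.ofList entries).filter (fun k => decide (2 ≤ entries.count k))).map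
          (fun k => (k, (entries.count k : Int))) := by
    rw [List.filter_map]
    congr 1
    apply List.filter_congr
    intro k _
    simp only [Function.comp]
    rw [show (decide (1 < ((entries.count k : Int)))) = decide (2 ≤ entries.count k) by
      simp; omega]
  rw [h1, List.map_map]
  have h2 : ((fun p : String × Int => p.1) ∘ fun k => (k, (entries.count k : Int))) = id := rfl
  rw [h2, List.map_id]
  exact PySem.Set.ofList_eq_self_of_nodup _
    ((PySem.Set.nodup_ofList entries).filter _)

-- A's sorted duplicate list IS B's adjacent-run scan of the sorted entries
lemma dupsA_eq_dupAdj (entries : List String) :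
    PySem.List.sorted
        (PySem.Set.ofList ((((PySem.Dict.counter entries).items).filter (fun p => 1 < p.2)).map (fun p => p.1)))
        (fun s => s) =
      dupAdj (PySem.List.sorted entries (fun s => s)) := by
  rw [dupsA_eq]
  have hsortpw : (PySem.List.sorted entries (fun s => s)).Pairwise (· ≤ ·) :=
    PySem.List.sorted_pairwise entries (fun s => s)
  obtain ⟨hpw, hmem⟩ := dupAdj_spec _ hsortpw
  apply PySem.List.sorted_eq_of_perm_of_pairwise_lt
  · -- dupAdj (sorted entries) is a permutation of the filtered set
    apply (List.perm_ext_iff_of_nodup hpw.nodup ((PySem.Set.nodup_ofList entries).filter _)).mpr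
    intro x
    rw [hmem]
    have hcnt : (PySem.List.sorted entries (fun s => s)).count x = entries.count x :=
      (PySem.List.sorted_perm entries (fun s => s) false).count_eq x
    rw [hcnt]
    simp only [List.mem_filter, PySem.Set.mem_ofList, decide_eq_true_eq]
    constructor
    · intro hc; exact ⟨List.count_pos_iff.mp (by omega), hc⟩
    · exact fun hh => hh.2
  · exact hpw

-- the non-string sorted set: either empty or exactly ["None"]
lemma map_pyStrOfOpt_filter (l : List (Option String)) :
    (l.filter (fun i => !i.isSome)).map pyStrOfOpt =
      List.replicate ((l.filter (fun i => !i.isSome)).length) "None" := by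
  rw [List.eq_replicate_iff]
  refine ⟨by simp, ?_⟩
  intro b hb
  simp only [List.mem_map, List.mem_filter] at hb
  obtain ⟨i, ⟨_, hi⟩, rfl⟩ := hb
  cases i with
  | none => rfl
  | some s => simp at hi

lemma ofList_replicate_none (n : Nat) :
    PySem.Set.ofList (List.replicate n "None") = if n = 0 then [] else ["None"] := by
  induction n with
  | zero => rfl
  | succ n ih =>
    rw [List.replicate_succ', PySem.Set.ofList_append, ih]
    by_cases h : n = 0 <;> simp [h, PySem.Set.update, PySem.Set.add]

-- ===== VERDICT (by name: the statement is the Claim_ definition above) =====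
theorem diff_sequence_py_spec : Claim_equal_diff_sequence_py := by
  intro label observed _
  unfold Spec_diff_sequence_py diff_sequence_py diff_sequence_py_alt
  by_cases hemp : observed.isEmpty
  · simp [hemp]
  · simp only [hemp, if_false, Bool.false_eq_true]
    have hns : PySem.Set.ofList ((observed.filter (fun i => !i.isSome)).map pyStrOfOpt) =
        if (observed.filter (fun i => !i.isSome)).isEmpty then ([] : List String) else ["None"] := by
      rw [map_pyStrOfOpt_filter, ofList_replicate_none]
      simp
    rw [dupsA_eq_dupAdj, hns]
    have hs1 : PySem.List.sorted (["None"] : List String) (fun s => s) = ["None"] := rfl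
    by_cases h1 : (observed.filter (fun i => !i.isSome)).isEmpty
    · have hs0 : PySem.List.sorted ([] : List String) (fun s => s) = [] := rfl
      simp only [h1, if_true, hs0]
      simp
    · simp only [h1, if_false, Bool.false_eq_true, hs1]
      simp
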